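-- pv_equiv track=rewrite | github.com/daniel-reich/ubiquitous-fiesta | W73q9yML66xXbFfGY_13.py | coloured_triangle
-- ===== SOURCE A (Python) =====
-- def color(a,b):
--   if a==b:
--     return a
--   else:
--     if set([a,b])=={'R', 'G'}:
--       return 'B'
--     elif set([a,b])=={'R', 'B'}:
--       return 'G'
--     else:
--       return 'R'
--
-- def coloured_triangle(row):
--   s=row
--   while len(s)>1:
--     t=''
--     for i in range(len(s)-1):
--       t+=color(s[i],s[i+1])
--     s=t
--   return s
-- ===== SOURCE B (Python) =====
-- # Streaming reformulation: one left-to-right pass over the row, maintaining the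
-- # right edge of every derived row of the triangle; the deepest edge is the answer.
--
-- def combine(a, b):
--     if a == b:
--         return a
--     pair = {a, b}
--     if pair == {'R', 'G'}:
--         return 'B'
--     if pair == {'R', 'B'}:
--         return 'G'
--     return 'R'
--
-- def coloured_triangle(row):
--     edge = []  # edge[k] = rightmost element so far of the k-th derived row
--     for c in row:
--         new = c
--         for k in range(len(edge)):
--             old = edge[k]
--             edge[k] = new
--             new = combine(old, new)
--         edge.append(new)
--     return edge[-1] if edge else row
-- ===== Notes on version B (the rewrite author's own statement) =====
-- stated objective: alternative
-- what changed: A repeatedly rewrites the whole row (building a new row from each adjacent pair) until one character is left; B makes a single left-to-right pass over the input, maintaining in one list the current right edge of every derived row of the triangle and updating it in place per character, returning the deepest edge.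
import Mathlib
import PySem

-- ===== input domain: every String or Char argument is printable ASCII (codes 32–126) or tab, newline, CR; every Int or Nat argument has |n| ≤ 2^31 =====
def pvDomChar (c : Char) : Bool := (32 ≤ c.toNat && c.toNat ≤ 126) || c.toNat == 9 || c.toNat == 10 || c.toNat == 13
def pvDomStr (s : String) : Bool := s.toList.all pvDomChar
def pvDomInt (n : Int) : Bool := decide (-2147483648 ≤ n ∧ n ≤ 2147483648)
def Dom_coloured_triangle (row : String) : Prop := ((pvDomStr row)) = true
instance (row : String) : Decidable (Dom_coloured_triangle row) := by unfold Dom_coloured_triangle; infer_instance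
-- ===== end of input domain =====

-- B replaces A's repeated whole-row rewriting by a single left-to-right pass that
-- maintains the right edge of every derived row of the triangle (alternative traversal).

-- ===== PORT A =====

-- color(a, b)
def pvColor (a b : Char) : Char :=
  if a = b then a
  else if PySem.Set.equal (PySem.Set.ofList [a, b]) (PySem.Set.ofList ['R', 'G']) then 'B'
  else if PySem.Set.equal (PySem.Set.ofList [a, b]) (PySem.Set.ofList ['R', 'B']) then 'G'
  else 'R'

-- one iteration of A's while-loop body: t = ''; for i in range(len(s)-1): t += color(s[i], s[i+1])
-- (s[i] and s[i+1] are always in range here, so pyGetD is exact)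
def pvPass (s : List Char) : List Char :=
  (PySem.List.pyRange 0 (PySem.List.len s - 1) 1).foldl
    (fun t i => t ++ [pvColor (PySem.List.pyGetD s i 'R') (PySem.List.pyGetD s (i + 1) 'R')]) []

-- the two lemmas the while-loop's termination cites: each pass shortens s by one
theorem pvPass_eq (s : List Char) :
    pvPass s = (List.range (s.length - 1)).map
      (fun j => pvColor (s.getD j 'R') (s.getD (j + 1) 'R')) := by
  unfold pvPass
  rw [PySem.List.foldl_append_singleton_eq_map, PySem.List.pyRange_one]
  have ht : ((PySem.List.len s - 1 - 0).toNat) = s.length - 1 := by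
    simp [PySem.List.len_eq]
  rw [ht, List.map_map, List.nil_append]
  apply List.map_congr_left
  intro k hk
  simp only [Function.comp, zero_add]
  have h2 : ((k : Int) + 1) = ((k + 1 : Nat) : Int) := by push_cast; ring
  rw [h2, PySem.List.pyGetD_natCast, PySem.List.pyGetD_natCast]

theorem pvPass_length (s : List Char) : (pvPass s).length = s.length - 1 := by
  rw [pvPass_eq]; simp

-- while len(s) > 1: s = pass(s)
def pvLoop (s : List Char) : List Char :=
  if 1 < PySem.List.len s then pvLoop (pvPass s) else s
termination_by s.length
decreasing_by simp [PySem.List.len_eq] at *; rw [pvPass_length]; omega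

def coloured_triangle (row : String) : String := String.ofList (pvLoop row.toList)

-- ===== PORT B =====

-- combine(a, b)
def pvCombine (a b : Char) : Char :=
  if a = b then a
  else
    let pair := PySem.Set.ofList [a, b]
    if PySem.Set.equal pair (PySem.Set.ofList ['R', 'G']) then 'B'
    else if PySem.Set.equal pair (PySem.Set.ofList ['R', 'B']) then 'G'
    else 'R'

-- the inner loop: new = c; for k in range(len(edge)): old = edge[k]; edge[k] = new;
-- new = combine(old, new)  — returns (the updated edge list, the final new)
def pvInner : List Char → Char → List Char × Char
  | [], new => ([], new)
  | old :: rest, new =>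
      let p := pvInner rest (pvCombine old new)
      (new :: p.1, p.2)

-- edge[-1] is in range whenever edge ≠ [], which is the branch that reads it
def coloured_triangle_alt (row : String) : String :=
  let edge := row.toList.foldl (fun edge c =>
    let p := pvInner edge c
    p.1 ++ [p.2]) []
  if edge = [] then row else String.ofList [(PySem.List.pyGet? edge (-1)).getD 'R']

-- ===== PRECONDITION & SPEC =====

def Spec_coloured_triangle (row : String) (out : String) : Prop := out = coloured_triangle_alt row
instance (row : String) (out : String) : Decidable (Spec_coloured_triangle row out) := by
  unfold Spec_coloured_triangle; infer_instance

-- ===== CLAIM (what is proved, stated in full; the proofs are below) =====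
def Claim_equal_coloured_triangle : Prop := ∀ (row : String), Dom_coloured_triangle row → Spec_coloured_triangle row (coloured_triangle row)

-- ===== LEMMAS AND PROOFS =====

-- k iterated passes
def pvIter : Nat → List Char → List Char
  | 0, s => s
  | k + 1, s => pvIter k (pvPass s)

-- "last element" in the getD form used throughout
def pvLast (s : List Char) : Char := s.getD (s.length - 1) 'R'

theorem pvIter_length (k : Nat) : ∀ s : List Char, (pvIter k s).length = s.length - k := by
  induction k with
  | zero => intro s; simp [pvIter]
  | succ n ih =>
    intro s
    rw [pvIter, ih (pvPass s), pvPass_length]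
    omega

-- A's while-loop runs exactly len - 1 passes
theorem pvLoop_eq_iter (s : List Char) : pvLoop s = pvIter (s.length - 1) s := by
  rw [pvLoop]
  by_cases h : 2 ≤ s.length
  · rw [if_pos (by simp [PySem.List.len_eq]; omega),
      pvLoop_eq_iter (pvPass s), pvPass_length]
    obtain ⟨m, hm⟩ : ∃ m, s.length = m + 2 := ⟨s.length - 2, by omega⟩
    rw [hm, show m + 2 - 1 - 1 = m from by omega, show m + 2 - 1 = m + 1 from by omega]
    rfl
  · rw [if_neg (by simp [PySem.List.len_eq]; omega)]
    have h0 : s.length - 1 = 0 := by omega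
    rw [h0]
    rfl
termination_by s.length
decreasing_by rw [pvPass_length]; omega

theorem pvCombine_eq_color (a b : Char) : pvCombine a b = pvColor a b := rfl

-- a pass of s ++ [c] appends combine(last s, c) to the pass of s
theorem pvPass_append (s : List Char) (c : Char) (hs : s ≠ []) :
    pvPass (s ++ [c]) = pvPass s ++ [pvColor (pvLast s) c] := by
  obtain ⟨m, hm⟩ : ∃ m, s.length = m + 1 := ⟨s.length - 1, by
    have := List.length_pos_iff.mpr hs; omega⟩
  rw [pvPass_eq, pvPass_eq]
  have hlen : (s ++ [c]).length - 1 = m + 1 := by simp [hm]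
  rw [hlen, hm, List.range_succ, List.map_append, Nat.add_sub_cancel]
  congr 1
  · apply List.map_congr_left
    intro j hj
    have hjm := List.mem_range.mp hj
    rw [List.getD_eq_getElem (s ++ [c]) 'R' (by simp [hm]; omega),
      List.getD_eq_getElem (s ++ [c]) 'R' (by simp [hm]; omega),
      List.getElem_append_left (by omega), List.getElem_append_left (by omega)]
    rw [← List.getD_eq_getElem s 'R']
    rw [← List.getD_eq_getElem s 'R']
  · simp only [List.map_cons, List.map_nil]
    congr 2
    · rw [List.getD_eq_getElem (s ++ [c]) 'R' (by simp [hm]),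
        List.getElem_append_left (by omega), ← List.getD_eq_getElem s 'R']
      unfold pvLast
      rw [hm, Nat.add_sub_cancel]
    · rw [List.getD_eq_getElem (s ++ [c]) 'R' (by simp [hm]),
        List.getElem_append_right (by omega)]
      simp [hm]

theorem pvLast_append (s : List Char) (c : Char) : pvLast (s ++ [c]) = c := by
  unfold pvLast
  rw [List.getD_eq_getElem (s ++ [c]) 'R' (by simp),
    List.getElem_append_right (by simp)]
  simp

-- the edge list B maintains after consuming s: the last element of every derived row
def pvEdge (s : List Char) : List Char :=
  (List.range s.length).map (fun k => pvLast (pvIter k s))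

-- the inner loop turns the edges of s into the edges of s ++ [c] plus the new deepest edge
theorem pvInner_spec (s : List Char) (c : Char) (hs : s ≠ []) :
    pvInner (pvEdge s) c
      = ((List.range s.length).map (fun k => pvLast (pvIter k (s ++ [c]))),
         pvLast (pvIter s.length (s ++ [c]))) := by
  obtain ⟨m, hm⟩ : ∃ m, s.length = m + 1 := ⟨s.length - 1, by
    have := List.length_pos_iff.mpr hs; omega⟩
  have hedge : pvEdge s = pvLast s :: (List.range m).map (fun k => pvLast (pvIter k (pvPass s))) := by
    unfold pvEdge
    rw [hm, List.range_succ_eq_map, List.map_cons, List.map_map]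
    rfl
  have hpass : pvPass (s ++ [c]) = pvPass s ++ [pvColor (pvLast s) c] := pvPass_append s c hs
  rw [hedge]
  show (c :: (pvInner ((List.range m).map fun k => pvLast (pvIter k (pvPass s)))
      (pvCombine (pvLast s) c)).1,
    (pvInner ((List.range m).map fun k => pvLast (pvIter k (pvPass s)))
      (pvCombine (pvLast s) c)).2) = _
  rw [pvCombine_eq_color]
  by_cases hm0 : m = 0
  · -- s is a singleton: the recursive edge list is empty
    subst hm0
    have h1 : ((List.range 0).map fun k => pvLast (pvIter k (pvPass s))) = [] := rfl
    rw [h1]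
    show (c :: [], pvColor (pvLast s) c) = _
    rw [hm]
    have h2 : (List.range 1).map (fun k => pvLast (pvIter k (s ++ [c]))) = [pvLast (s ++ [c])] := rfl
    rw [h2, pvLast_append]
    have h3 : pvIter 1 (s ++ [c]) = pvPass (s ++ [c]) := rfl
    have h4 : pvLast (pvIter 1 (s ++ [c])) = pvColor (pvLast s) c := by
      rw [h3, hpass]
      have h5 : pvPass s = [] := by
        have := pvPass_length s
        rw [hm] at this
        simp at this
        exact this
      rw [h5, List.nil_append, pvLast]
      rfl
    rw [h4]
  · -- s has length ≥ 2: apply the induction hypothesis to pvPass s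
    have hps : pvPass s ≠ [] := by
      have := pvPass_length s
      rw [hm] at this
      intro h
      rw [h] at this
      simp at this
      omega
    have hplen : (pvPass s).length = m := by rw [pvPass_length, hm]; omega
    have hEdgeP : pvEdge (pvPass s) = (List.range m).map (fun k => pvLast (pvIter k (pvPass s))) := by
      unfold pvEdge
      rw [hplen]
    have ih := pvInner_spec (pvPass s) (pvColor (pvLast s) c) hps
    rw [hEdgeP] at ih
    rw [ih, hplen]
    have hcomm : pvPass s ++ [pvColor (pvLast s) c] = pvPass (s ++ [c]) := hpass.symm
    rw [hcomm]
    have hiter : ∀ k, pvIter k (pvPass (s ++ [c])) = pvIter (k + 1) (s ++ [c]) := fun k => rfl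
    simp only [Prod.mk.injEq]
    refine ⟨?_, ?_⟩
    case _ =>
      -- first components
      rw [hm, List.range_succ_eq_map, List.map_cons, List.map_map]
      refine List.cons_eq_cons.mpr ⟨?_, ?_⟩
      · rw [show pvIter 0 (s ++ [c]) = s ++ [c] from rfl, pvLast_append]
      · apply List.map_congr_left
        intro k hk
        simp only [Function.comp_apply]
        rw [hiter k]
    case _ =>
      rw [hiter m, hm]
termination_by s.length
decreasing_by rw [pvPass_length]; omega

-- the outer fold builds exactly the edge list
theorem pvFold_eq_edge (s : List Char) :
    s.foldl (fun edge c => let p := pvInner edge c; p.1 ++ [p.2]) [] = pvEdge s := by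
  induction s using List.reverseRecOn with
  | nil => rfl
  | append_singleton t c ih =>
    rw [List.foldl_append, ih, List.foldl_cons, List.foldl_nil]
    by_cases ht : t = []
    · subst ht
      rfl
    · rw [pvInner_spec t c ht]
      show ((List.range t.length).map fun k => pvLast (pvIter k (t ++ [c])))
          ++ [pvLast (pvIter t.length (t ++ [c]))] = _
      unfold pvEdge
      rw [List.length_append, List.length_singleton, List.range_succ, List.map_append,
        List.map_singleton]

-- a list of length 1 is the singleton of its last element
theorem pvSingleton (l : List Char) (h : l.length = 1) : l = [pvLast l] := by
  match l, h with
  | [a], _ => rfl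

-- ===== VERDICT (by name: the statement is the Claim_ definition above) =====
theorem coloured_triangle_spec : Claim_equal_coloured_triangle := by
  intro row _
  unfold Spec_coloured_triangle coloured_triangle coloured_triangle_alt
  rw [pvFold_eq_edge]
  by_cases hs : row.toList = []
  · rw [if_pos (by rw [hs]; rfl), hs,
      show pvLoop ([] : List Char) = [] from by rw [pvLoop]; rfl, ← hs]
    exact String.ofList_toList
  · have hm : 1 ≤ row.toList.length := by
      have := List.length_pos_iff.mpr hs; omega
    have hne : pvEdge row.toList ≠ [] := by
      unfold pvEdge
      intro h
      rw [List.map_eq_nil_iff, List.range_eq_nil] at h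
      omega
    rw [if_neg hne, pvLoop_eq_iter]
    have hlen1 : (pvIter (row.toList.length - 1) row.toList).length = 1 := by
      rw [pvIter_length]
      omega
    rw [pvSingleton _ hlen1]
    congr 1
    -- edge[-1] is the last entry of pvEdge, i.e. the last of the deepest row
    have hel : (pvEdge row.toList).length = row.toList.length := by
      unfold pvEdge; simp
    have hget : PySem.List.pyGet? (pvEdge row.toList) (-1)
        = (pvEdge row.toList)[(pvEdge row.toList).length - 1]? := by
      exact PySem.List.pyGet?_neg_ofNat (pvEdge row.toList) 1 (by omega) (by omega)
    rw [hget, hel]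
    unfold pvEdge
    obtain ⟨m, hm2⟩ : ∃ m, row.toList.length = m + 1 := ⟨row.toList.length - 1, by omega⟩
    rw [hm2, List.range_succ, List.map_append, List.map_singleton]
    simp
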